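-- pv_equiv track=rewrite | github.com/mruck/athena | fuzzer/params.py | dedup_params
-- ===== SOURCE A (Python) =====
-- def dedup_params(raw_params):
--     full_dict = {}
--
--     def update_dict(d, arr):
--         curr = d
--         for i in range(len(arr)):
--             key = arr[i]
--             if key not in curr:
--                 curr[key] = {}
--             curr = curr[key]
--
--     def leaf_paths(d):
--         output = []
--         for k, v in d.items():
--             if len(v) == 0:
--                 output.append([k])
--             else:
--                 child_output = leaf_paths(v)
--                 output.extend([[k] + o for o in child_output])
--         return output
--
--     for arr in raw_params:
--         try:
--             update_dict(full_dict, arr)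
--         # For some reason sometimes we dump the key as as a dict or
--         # array. Skip this for now
--         except TypeError:
--             pass
--
--     return leaf_paths(full_dict)
-- ===== SOURCE B (Python) =====
-- def dedup_params(raw_params):
--     # Build the same trie of nested dicts, but via setdefault in one loop,
--     # then emit root-to-leaf paths with an explicit-stack pre-order DFS
--     # instead of recursion.
--     root = {}
--     for arr in raw_params:
--         node = root
--         for key in arr:
--             node = node.setdefault(key, {})
--     out = []
--     stack = [([k], v) for k, v in reversed(list(root.items()))]
--     while stack:
--         prefix, node = stack.pop()
--         if not node:
--             out.append(prefix)
--         else: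
--             stack.extend((prefix + [k], v) for k, v in reversed(list(node.items())))
--     return out
-- ===== Notes on version B (the rewrite author's own statement) =====
-- stated objective: alternative
-- what changed: B builds the same trie with dict.setdefault in a single loop and replaces the recursive leaf_paths with an explicit-stack pre-order DFS (children pushed in reverse so leaves come out in the same insertion-order pre-order).
import Mathlib
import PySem

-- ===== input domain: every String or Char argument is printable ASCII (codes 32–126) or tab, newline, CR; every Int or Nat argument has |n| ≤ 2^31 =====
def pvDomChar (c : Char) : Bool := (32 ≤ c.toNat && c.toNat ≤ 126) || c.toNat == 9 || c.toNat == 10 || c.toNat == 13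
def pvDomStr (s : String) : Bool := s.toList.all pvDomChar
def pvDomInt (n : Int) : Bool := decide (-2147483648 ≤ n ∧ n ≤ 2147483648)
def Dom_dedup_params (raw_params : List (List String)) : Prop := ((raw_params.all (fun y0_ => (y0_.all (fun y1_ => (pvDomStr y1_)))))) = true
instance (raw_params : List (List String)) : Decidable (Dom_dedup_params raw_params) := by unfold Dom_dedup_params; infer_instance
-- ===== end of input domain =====

-- B replaces the recursive leaf-path traversal by an explicit-stack pre-order DFS
-- (and builds the trie with setdefault): objective "alternative", not claimed faster.

-- A trie of nested string-keyed dicts.  Python's nested dicts become a mutual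
-- inductive (children kept in insertion order, as a dict's items are).
mutual
inductive Trie where
  | mk : TrieChildren → Trie
inductive TrieChildren where
  | nil : TrieChildren
  | cons : String → Trie → TrieChildren → TrieChildren
end

-- dict lookup `curr[key]` / `key in curr` for a string-keyed dict: first (unique) match
def childFind : TrieChildren → String → Option Trie
  | .nil, _ => none
  | .cons k t rest, key => if k == key then some t else childFind rest key

-- dict write `curr[key] = v`: overwrite in place keeping order, else append (insertion order)
def childSet : TrieChildren → String → Trie → TrieChildren
  | .nil, key, v => .cons key v .nil
  | .cons k t rest, key, v =>
      if k == key then .cons k v rest else .cons k t (childSet rest key v)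

-- `len(v) == 0` on a dict
def trieEmpty : Trie → Bool
  | .mk .nil => true
  | _ => false

-- ===== PORT A =====
-- A's update_dict: walk the path, creating `{}` for a missing key; the imperative
-- cursor mutation becomes recursion on the path, rewriting the visited spine.
def updateDict : Trie → List String → Trie
  | t, [] => t
  | .mk c, key :: rest =>
      match childFind c key with
      | some child => .mk (childSet c key (updateDict child rest))
      | none => .mk (childSet c key (updateDict (.mk .nil) rest))

-- A's recursive leaf_paths over d.items()
mutual
def leafPaths : Trie → List (List String)
  | .mk c => leafPathsC c
def leafPathsC : TrieChildren → List (List String)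
  | .nil => []
  | .cons k v rest =>
      (if trieEmpty v then [[k]] else (leafPaths v).map (fun o => k :: o)) ++ leafPathsC rest
end

-- the try/except TypeError in A is unreachable here: string keys are hashable
def dedup_params (raw_params : List (List String)) : List (List String) :=
  leafPaths (raw_params.foldl (fun d arr => updateDict d arr) (.mk .nil))

-- ===== PORT B =====
-- B's insertion loop: node = node.setdefault(key, {})
def insertPath : Trie → List String → Trie
  | t, [] => t
  | .mk c, key :: rest =>
      let child := (childFind c key).getD (.mk .nil)   -- setdefault(key, {})
      .mk (childSet c key (insertPath child rest))

-- children of a node paired with their extended prefixes (pushed so that the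
-- first child is on top of the stack; the Lean stack keeps its top at the head,
-- mirroring Source B's end-of-list top with reversed pushes)
def entries (p : List String) : TrieChildren → List (List String × Trie)
  | .nil => []
  | .cons k t rest => (p ++ [k], t) :: entries p rest

mutual
def trieSize : Trie → Nat
  | .mk c => 1 + childSize c
def childSize : TrieChildren → Nat
  | .nil => 0
  | .cons _ t rest => trieSize t + childSize rest
end

def stackSize (s : List (List String × Trie)) : Nat :=
  (s.map (fun e => trieSize e.2)).sum

theorem stackSize_entries (p : List String) : (c : TrieChildren) →
    stackSize (entries p c) = childSize c
  | .nil => by simp [stackSize, entries, childSize]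
  | .cons k t rest => by
      simp only [stackSize, entries, childSize, List.map_cons, List.sum_cons]
      have := stackSize_entries p rest
      simp [stackSize] at this
      omega

-- Source B's while loop over the explicit stack
def dfs : List (List String × Trie) → List (List String) → List (List String)
  | [], acc => acc
  | (p, .mk .nil) :: rest, acc => dfs rest (acc ++ [p])
  | (p, .mk (.cons k t c)) :: rest, acc =>
      dfs (entries p (.cons k t c) ++ rest) acc
termination_by s _ => stackSize s
decreasing_by
  · simp [stackSize, trieSize]
  · simp only [stackSize, List.map_append, List.sum_append]
    have h1 := stackSize_entries p (TrieChildren.cons k t c)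
    simp only [stackSize] at h1
    simp only [h1, List.map_cons, List.sum_cons, trieSize]
    omega

def dedup_params_alt (raw_params : List (List String)) : List (List String) :=
  match raw_params.foldl (fun d arr => insertPath d arr) (.mk .nil) with
  | .mk c => dfs (entries [] c) []

-- ===== PRECONDITION & SPEC =====
def Spec_dedup_params (raw_params : List (List String)) (out : List (List String)) : Prop := out = dedup_params_alt raw_params
instance (raw_params : List (List String)) (out : List (List String)) : Decidable (Spec_dedup_params raw_params out) := by unfold Spec_dedup_params; infer_instance

-- ===== CLAIM (what is proved, stated in full; the proofs are below) =====
def Claim_equal_dedup_params : Prop := ∀ (raw_params : List (List String)), Dom_dedup_params raw_params → Spec_dedup_params raw_params (dedup_params raw_params)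

-- ===== LEMMAS AND PROOFS =====

-- the two insertions build the same trie
theorem updateDict_eq_insertPath (l : List String) (t : Trie) :
    updateDict t l = insertPath t l := by
  induction l generalizing t with
  | nil => rfl
  | cons key rest ih =>
      cases t with
      | mk c =>
        cases h : childFind c key <;>
          simp [updateDict, insertPath, h, Option.getD, ih]

-- the paths one stack entry contributes
def entryPaths (e : List String × Trie) : List (List String) :=
  if trieEmpty e.2 then [e.1] else (leafPaths e.2).map (fun o => e.1 ++ o)

theorem entries_flatMap : (c : TrieChildren) → (p : List String) →
    (entries p c).flatMap entryPaths = (leafPathsC c).map (fun o => p ++ o)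
  | .nil, p => by simp [entries, leafPathsC]
  | .cons k t rest, p => by
      simp only [entries, leafPathsC, List.flatMap_cons, List.map_append,
        entries_flatMap rest p]
      congr 1
      by_cases h : trieEmpty t = true
      · simp [entryPaths, h]
      · simp only [entryPaths, h, Bool.false_eq_true, if_false, List.map_map]
        apply List.map_congr_left
        intro o _
        simp

theorem dfs_eq (s : List (List String × Trie)) (acc : List (List String)) :
    dfs s acc = acc ++ s.flatMap entryPaths := by
  induction s, acc using dfs.induct with
  | case1 acc => simp [dfs]
  | case2 p rest acc ih =>
      simp [dfs, ih, entryPaths, trieEmpty, List.flatMap_cons]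
  | case3 p k t c rest acc ih =>
      rw [dfs, ih]
      simp only [List.flatMap_append, List.flatMap_cons]
      rw [entries_flatMap]
      have : entryPaths (p, Trie.mk (.cons k t c)) =
          (leafPathsC (.cons k t c)).map (fun o => p ++ o) := by
        simp [entryPaths, trieEmpty, leafPaths]
      rw [this]

-- ===== VERDICT (by name: the statement is the Claim_ definition above) =====
theorem dedup_params_spec : Claim_equal_dedup_params := by
  intro raw _
  unfold Spec_dedup_params dedup_params dedup_params_alt
  have hfold : raw.foldl (fun d arr => updateDict d arr) (.mk .nil) =
      raw.foldl (fun d arr => insertPath d arr) (.mk .nil) := by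
    simp [updateDict_eq_insertPath]
  rw [hfold]
  cases h : raw.foldl (fun d arr => insertPath d arr) (.mk .nil) with
  | mk c =>
      show leafPaths (Trie.mk c) = dfs (entries [] c) []
      rw [dfs_eq, entries_flatMap]
      simp [leafPaths]
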